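-- pv_equiv track=rewrite | github.com/kaltas21/ForeWatt | src/models/baseline/feature_selector.py | get_categorical_features
-- ===== SOURCE A (Python) =====
-- from typing import List, Dict, Tuple, Optional
--
-- def get_categorical_features(feature_list: List[str]) -> List[str]:
--     """
--     Identify categorical features from feature list.
--
--     Args:
--         feature_list: List of feature names
--
--     Returns:
--         List of categorical feature names
--     """
--     categorical = []
--
--     # Binary flags
--     binary_prefixes = ['is_', 'has_']
--     for feature in feature_list:
--         if any(feature.startswith(prefix) for prefix in binary_prefixes):
--             categorical.append(feature)
--
--     # Explicit categorical
--     explicit_categorical = ['holiday_name', 'dow', 'dom', 'month_x', 'month_y']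
--     for feature in feature_list:
--         if feature in explicit_categorical and feature not in categorical:
--             categorical.append(feature)
--
--     return categorical
-- ===== SOURCE B (Python) =====
-- EXPLICIT_CATEGORICAL = frozenset({'holiday_name', 'dow', 'dom', 'month_x', 'month_y'})
--
-- def get_categorical_features(feature_list):
--     prefix_matches = []
--     explicit_matches = []
--     seen = set()
--     for feature in feature_list:
--         if feature.startswith(('is_', 'has_')):
--             prefix_matches.append(feature)
--         elif feature in EXPLICIT_CATEGORICAL and feature not in seen:
--             explicit_matches.append(feature)
--             seen.add(feature)
--     return prefix_matches + explicit_matches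
-- ===== Notes on version B (the rewrite author's own statement) =====
-- stated objective: faster
-- what changed: A scans the list twice, with the explicit pass doing a linear membership check on the growing result list; B does one pass routing each feature into a prefix bucket (duplicates kept) or a deduplicated explicit bucket tracked by a set, then concatenates the buckets.
import Mathlib
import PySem

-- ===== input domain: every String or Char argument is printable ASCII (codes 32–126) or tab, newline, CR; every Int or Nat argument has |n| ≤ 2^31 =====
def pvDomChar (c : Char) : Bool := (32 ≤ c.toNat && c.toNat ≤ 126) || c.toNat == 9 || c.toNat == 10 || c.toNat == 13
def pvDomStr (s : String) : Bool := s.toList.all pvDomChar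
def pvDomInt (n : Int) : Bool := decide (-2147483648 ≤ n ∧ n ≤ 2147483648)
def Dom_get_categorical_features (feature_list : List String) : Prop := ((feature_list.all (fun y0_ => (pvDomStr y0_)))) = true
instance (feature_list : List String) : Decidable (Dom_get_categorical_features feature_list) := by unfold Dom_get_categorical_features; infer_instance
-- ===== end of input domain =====

-- B replaces A's two scans (prefix pass, then explicit pass with a linear membership
-- check on the growing result) by one bucketed pass with a seen-set, then concatenation.


-- ===== PORT A =====
def get_categorical_features (feature_list : List String) : List String :=
  let binary_prefixes : List String := ["is_", "has_"]
  let categorical : List String :=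
    feature_list.foldl
      (fun acc feature =>
        if binary_prefixes.any (fun pre => PySem.Str.startswith feature pre)
        then acc ++ [feature] else acc) []
  let explicit_categorical : List String := ["holiday_name", "dow", "dom", "month_x", "month_y"]
  feature_list.foldl
    (fun acc feature =>
      if explicit_categorical.contains feature && !(acc.contains feature)
      then acc ++ [feature] else acc) categorical

-- ===== PORT B =====
def pvExplicitSet : PySem.Set String :=
  PySem.Set.ofList ["holiday_name", "dow", "dom", "month_x", "month_y"]

def pvGcfGo : List String → List String → List String → PySem.Set String → List String
  | [], prefix_matches, explicit_matches, _ => prefix_matches ++ explicit_matches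
  | feature :: rest, prefix_matches, explicit_matches, seen =>
    if PySem.Str.startswith feature "is_" || PySem.Str.startswith feature "has_" then
      pvGcfGo rest (prefix_matches ++ [feature]) explicit_matches seen
    else if PySem.Set.contains pvExplicitSet feature && !(PySem.Set.contains seen feature) then
      pvGcfGo rest prefix_matches (explicit_matches ++ [feature]) (PySem.Set.add seen feature)
    else
      pvGcfGo rest prefix_matches explicit_matches seen

def get_categorical_features_alt (feature_list : List String) : List String :=
  pvGcfGo feature_list [] [] PySem.Set.empty

-- ===== PRECONDITION & SPEC =====
def Spec_get_categorical_features (feature_list : List String) (out : List String) : Prop := out = get_categorical_features_alt feature_list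
instance (feature_list : List String) (out : List String) : Decidable (Spec_get_categorical_features feature_list out) := by unfold Spec_get_categorical_features; infer_instance

-- ===== CLAIM (what is proved, stated in full; the proofs are below) =====
def Claim_equal_get_categorical_features : Prop := ∀ (feature_list : List String), Dom_get_categorical_features feature_list → Spec_get_categorical_features feature_list (get_categorical_features feature_list)

-- ===== LEMMAS AND PROOFS =====

/-- the prefix test, as B writes it -/
def pvPref (f : String) : Bool :=
  PySem.Str.startswith f "is_" || PySem.Str.startswith f "has_"

def pvExpl : List String := ["holiday_name", "dow", "dom", "month_x", "month_y"]

/-- A's second loop as a function of its starting accumulator (same lambda as port A) -/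
def pvFold2 (e : List String) (fl : List String) : List String :=
  fl.foldl
    (fun acc feature =>
      if pvExpl.contains feature && !(acc.contains feature)
      then acc ++ [feature] else acc) e

lemma pvFold2_cons (e : List String) (f : String) (fl : List String) :
    pvFold2 e (f :: fl) =
      pvFold2 (if pvExpl.contains f && !(e.contains f) then e ++ [f] else e) fl := rfl

lemma pvExpl_not_pref (f : String) (h : f ∈ pvExpl) : pvPref f = false := by
  simp only [pvExpl, List.mem_cons, List.not_mem_nil, or_false] at h
  rcases h with rfl | rfl | rfl | rfl | rfl <;> decide

/-- A's second loop started at q ++ e peels off q when every element of q passes the prefix test. -/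
lemma pvFold2_split (fl : List String) : ∀ (q e : List String),
    (∀ x ∈ q, pvPref x = true) → pvFold2 (q ++ e) fl = q ++ pvFold2 e fl := by
  induction fl with
  | nil => intro q e _; rfl
  | cons f rest ih =>
    intro q e hq
    rw [pvFold2_cons, pvFold2_cons]
    by_cases hc : (pvExpl.contains f && !(e.contains f)) = true
    · have hce : pvExpl.contains f = true := by revert hc; cases pvExpl.contains f <;> simp
      have hfq : q.contains f = false := by
        by_contra h
        have hm : f ∈ q := List.contains_iff_mem.mp (by simpa using h)
        have h1 := pvExpl_not_pref f (List.contains_iff_mem.mp hce)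
        rw [hq f hm] at h1
        exact absurd h1 (by decide)
      have hqe : (q ++ e).contains f = e.contains f := by
        rw [List.contains_append, hfq, Bool.false_or]
      rw [hqe, if_pos hc, if_pos hc, List.append_assoc]
      exact ih q (e ++ [f]) hq
    · by_cases hce : pvExpl.contains f = true
      · have hfq : q.contains f = false := by
          by_contra h
          have hm : f ∈ q := List.contains_iff_mem.mp (by simpa using h)
          have h1 := pvExpl_not_pref f (List.contains_iff_mem.mp hce)
          rw [hq f hm] at h1
          exact absurd h1 (by decide)
        have hqe : (q ++ e).contains f = e.contains f := by
          rw [List.contains_append, hfq, Bool.false_or]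
        rw [hqe, if_neg hc, if_neg hc]
        exact ih q e hq
      · have hce' : pvExpl.contains f = false := by simpa using hce
        rw [if_neg (by intro h; rw [hce'] at h; simp at h), if_neg hc]
        exact ih q e hq

lemma pvSetExpl_eq (f : String) : PySem.Set.contains pvExplicitSet f = pvExpl.contains f := by
  have h : pvExplicitSet = pvExpl := by decide
  rw [h]; rfl

lemma pvPref_not_expl (f : String) (h : pvPref f = true) : pvExpl.contains f = false := by
  by_contra hc
  have hm : f ∈ pvExpl := List.contains_iff_mem.mp (by simpa using hc)
  have h1 := pvExpl_not_pref f hm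
  rw [h] at h1
  exact absurd h1 (by decide)

/-- B's single pass equals prefix-filter ++ A's second loop, given seen ↔ explicit bucket. -/
lemma pvGcfGo_eq (fl : List String) : ∀ (pm em : List String) (seen : PySem.Set String),
    (∀ x : String, PySem.Set.contains seen x = em.contains x) →
    pvGcfGo fl pm em seen = (pm ++ fl.filter pvPref) ++ pvFold2 em fl := by
  induction fl with
  | nil => intro pm em seen _; simp [pvGcfGo, pvFold2]
  | cons f rest ih =>
    intro pm em seen hseen
    by_cases hp : pvPref f = true
    · have hp' : (PySem.Str.startswith f "is_" || PySem.Str.startswith f "has_") = true := hp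
      simp only [pvGcfGo]
      rw [if_pos hp', ih (pm ++ [f]) em seen hseen, List.filter_cons_of_pos hp,
        pvFold2_cons, if_neg (by intro h; rw [pvPref_not_expl f hp] at h; simp at h)]
      simp [List.append_assoc]
    · have hpf : pvPref f = false := by simpa using hp
      have hp' : ¬ ((PySem.Str.startswith f "is_" || PySem.Str.startswith f "has_") = true) := by
        intro h; exact hp h
      simp only [pvGcfGo]
      rw [if_neg hp', List.filter_cons_of_neg hp, pvFold2_cons]
      by_cases hc2 : (pvExpl.contains f && !(em.contains f)) = true
      · have hset : (PySem.Set.contains pvExplicitSet f && !(PySem.Set.contains seen f)) = true := by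
          rw [pvSetExpl_eq, hseen]; exact hc2
        have hemf : em.contains f = false := by
          revert hc2; cases em.contains f <;> simp
        have hseenf : PySem.Set.contains seen f = false := by rw [hseen]; exact hemf
        have hadd : ∀ x : String, PySem.Set.contains (PySem.Set.add seen f) x = (em ++ [f]).contains x := by
          intro x
          have haddeq : PySem.Set.add seen f = seen ++ [f] := by
            simp [PySem.Set.add, PySem.Set.contains] at hseenf ⊢
            simp [hseenf]
          rw [haddeq]
          show List.contains (seen ++ [f]) x = List.contains (em ++ [f]) x
          rw [List.contains_append (l₁ := seen), List.contains_append (l₁ := em),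
            show List.contains seen x = List.contains em x from hseen x]
        rw [if_pos hset, if_pos hc2]
        exact ih pm (em ++ [f]) (PySem.Set.add seen f) hadd
      · have hset : ¬ ((PySem.Set.contains pvExplicitSet f && !(PySem.Set.contains seen f)) = true) := by
          rw [pvSetExpl_eq, hseen]; exact hc2
        rw [if_neg hset, if_neg hc2]
        exact ih pm em seen hseen

/-- A's first loop is the prefix filter (via the library loop-shape lemma). -/
lemma pvFold1_eq (fl : List String) :
    fl.foldl
      (fun acc feature =>
        if (["is_", "has_"] : List String).any (fun pre => PySem.Str.startswith feature pre)
        then acc ++ [feature] else acc) [] = fl.filter pvPref := by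
  have h := PySem.List.foldl_append_if
    (p := fun feature : String =>
      (["is_", "has_"] : List String).any (fun pre => PySem.Str.startswith feature pre))
    (f := fun x : String => x) fl []
  simp only [List.map_id_fun', id, List.nil_append] at h
  rw [h]
  exact List.filter_congr (fun x _ => by simp [pvPref])

-- ===== VERDICT (by name: the statement is the Claim_ definition above) =====
theorem get_categorical_features_spec : Claim_equal_get_categorical_features := by
  intro fl _
  show pvFold2
      (fl.foldl
        (fun acc feature =>
          if (["is_", "has_"] : List String).any (fun pre => PySem.Str.startswith feature pre)
          then acc ++ [feature] else acc) []) fl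
    = pvGcfGo fl [] [] PySem.Set.empty
  rw [pvFold1_eq, pvGcfGo_eq fl [] [] PySem.Set.empty (fun x => rfl)]
  have hq : ∀ x ∈ fl.filter pvPref, pvPref x = true := fun x hx => (List.mem_filter.mp hx).2
  have h2 := pvFold2_split fl (fl.filter pvPref) [] hq
  simpa using h2
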